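-- pv_equiv track=rewrite | github.com/huytrantech/signal-python | exercise2.py | move_vector
-- ===== SOURCE A (Python) =====
-- def move_vector(x, ind, value):
--     if value == 0:
--         return ind, x
--
--     if value > 0:
--         for i in range(value):
--             if ind != 0:
--                 ind -= 1
--             else:
--                 x = [0] + x
--
--     if value < 0:
--         for i in range(-value):
--             if ind < len(x):
--                 ind += 1
--             if ind >= len(x):
--                 x = x + [0]
--
--     if ind >= len(x):
--         ind = len(x) - 1
--     if ind <= 0:
--         ind = 0
--
--     return ind, x
-- ===== SOURCE B (Python) =====
-- def move_vector(x, ind, value):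
--     if value == 0:
--         return ind, x
--     if value > 0:
--         if 0 <= ind < value:
--             x = [0] * (value - ind) + x
--             ind = 0
--         else:
--             ind -= value
--     else:
--         n = -value
--         L = len(x)
--         if ind >= L:
--             x = x + [0] * n
--             ind = L + n - 1
--         else:
--             ind += n
--             pad = ind - L + 1
--             if pad > 0:
--                 x = x + [0] * pad
--     if ind >= len(x):
--         ind = len(x) - 1
--     if ind <= 0:
--         ind = 0
--     return ind, x
-- ===== Notes on version B (the rewrite author's own statement) =====
-- stated objective: alternative
-- what changed: Replaced the per-step shifting loops (one iteration per unit of |value|, each possibly rebuilding the list) by a closed-form case analysis that computes the final index arithmetically and pads the list with the right number of zeros in one construction.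
import Mathlib
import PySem

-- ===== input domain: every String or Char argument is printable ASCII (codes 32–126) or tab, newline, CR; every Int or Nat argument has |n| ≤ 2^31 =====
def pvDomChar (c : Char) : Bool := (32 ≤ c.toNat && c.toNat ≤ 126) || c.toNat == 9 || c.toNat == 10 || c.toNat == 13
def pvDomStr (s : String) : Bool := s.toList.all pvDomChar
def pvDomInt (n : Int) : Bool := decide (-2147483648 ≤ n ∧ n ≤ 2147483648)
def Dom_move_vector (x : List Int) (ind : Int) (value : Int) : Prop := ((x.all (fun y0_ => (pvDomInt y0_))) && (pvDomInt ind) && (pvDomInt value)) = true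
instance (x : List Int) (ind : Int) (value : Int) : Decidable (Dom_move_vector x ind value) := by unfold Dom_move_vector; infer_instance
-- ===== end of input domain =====

-- B replaces A's step-by-step shifting loops by a closed-form case analysis building the result once.
-- NOTE: A appends/prepends to a fresh list and never mutates its arguments.

-- ===== PORT A =====
-- for i in range(value): if ind != 0: ind -= 1 else: x = [0] + x
def pvStepPos (s : Int × List Int) (_ : Int) : Int × List Int :=
  if s.1 ≠ 0 then (s.1 - 1, s.2) else (s.1, [(0 : Int)] ++ s.2)

-- for i in range(-value): if ind < len(x): ind += 1 ; if ind >= len(x): x = x + [0]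
def pvStepNeg (s : Int × List Int) (_ : Int) : Int × List Int :=
  let i := if s.1 < (s.2.length : Int) then s.1 + 1 else s.1
  (i, if i ≥ (s.2.length : Int) then s.2 ++ [(0 : Int)] else s.2)

def move_vector (x : List Int) (ind : Int) (value : Int) : Int × List Int :=
  if value = 0 then (ind, x)
  else
    let s1 := if value > 0 then (PySem.List.pyRange 0 value 1).foldl pvStepPos (ind, x) else (ind, x)
    let s2 := if value < 0 then (PySem.List.pyRange 0 (-value) 1).foldl pvStepNeg s1 else s1
    let i1 := if s2.1 ≥ (s2.2.length : Int) then (s2.2.length : Int) - 1 else s2.1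
    let i2 := if i1 ≤ 0 then 0 else i1
    (i2, s2.2)

-- ===== PORT B =====
def move_vector_alt (x : List Int) (ind : Int) (value : Int) : Int × List Int :=
  if value = 0 then (ind, x)
  else
    let s :=
      if value > 0 then
        if 0 ≤ ind ∧ ind < value then (0, List.replicate (value - ind).toNat (0 : Int) ++ x)
        else (ind - value, x)
      else
        let n := -value
        let L : Int := x.length
        if ind ≥ L then (L + n - 1, x ++ List.replicate n.toNat (0 : Int))
        else
          let i := ind + n
          let pad := i - L + 1
          (i, if pad > 0 then x ++ List.replicate pad.toNat (0 : Int) else x)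
    let i1 := if s.1 ≥ (s.2.length : Int) then (s.2.length : Int) - 1 else s.1
    let i2 := if i1 ≤ 0 then 0 else i1
    (i2, s.2)

-- ===== PRECONDITION & SPEC =====
def Spec_move_vector (x : List Int) (ind : Int) (value : Int) (out : Int × List Int) : Prop := out = move_vector_alt x ind value
instance (x : List Int) (ind : Int) (value : Int) (out : Int × List Int) : Decidable (Spec_move_vector x ind value out) := by unfold Spec_move_vector; infer_instance

-- ===== CLAIM (what is proved, stated in full; the proofs are below) =====
def Claim_equal_move_vector : Prop := ∀ (x : List Int) (ind : Int) (value : Int), Dom_move_vector x ind value → Spec_move_vector x ind value (move_vector x ind value)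

-- ===== LEMMAS AND PROOFS =====

def pvIter (f : (Int × List Int) → Int → (Int × List Int)) (n : Nat) (s : Int × List Int) : Int × List Int :=
  Nat.rec s (fun _ ih => f ih 0) n

theorem pvIter_succ (f : (Int × List Int) → Int → (Int × List Int)) (n : Nat) (s : Int × List Int) :
    pvIter f (n + 1) s = f (pvIter f n s) 0 := rfl

theorem pvIter_zero (f : (Int × List Int) → Int → (Int × List Int)) (s : Int × List Int) :
    pvIter f 0 s = s := rfl

theorem pvIter_shift (f : (Int × List Int) → Int → (Int × List Int)) (n : Nat) (s : Int × List Int) :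
    pvIter f n (f s 0) = f (pvIter f n s) 0 := by
  induction n generalizing s with
  | zero => rfl
  | succ m ih => rw [pvIter_succ, pvIter_succ, ih]

-- the steps ignore the range element, so the folds only depend on the length of the range
theorem foldl_const_step (f : (Int × List Int) → Int → (Int × List Int))
    (hf : ∀ s a b, f s a = f s b) :
    ∀ (l : List Int) (s : Int × List Int), l.foldl f s = pvIter f l.length s := by
  intro l
  induction l with
  | nil => intro s; rfl
  | cons a t ih =>
    intro s
    simp only [List.foldl_cons, List.length_cons, ih, pvIter_succ]
    rw [hf s a 0, pvIter_shift]

theorem pv_repl_left (n : Nat) (xs : List Int) :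
    List.replicate n (0:Int) ++ ([(0:Int)] ++ xs) = List.replicate (n+1) (0:Int) ++ xs := by
  rw [List.replicate_succ', List.append_assoc]

theorem pv_repl_right (n : Nat) (xs : List Int) :
    xs ++ [(0:Int)] ++ List.replicate n (0:Int) = xs ++ List.replicate (n+1) (0:Int) := by
  rw [List.append_assoc]
  rfl

theorem iterPos_closed (n : Nat) : ∀ (i : Int) (xs : List Int),
    pvIter pvStepPos n (i, xs) =
      if 0 ≤ i ∧ i < (n : Int) then (0, List.replicate ((n : Int) - i).toNat 0 ++ xs)
      else (i - n, xs) := by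
  induction n with
  | zero =>
    intro i xs
    have h : ¬ (0 ≤ i ∧ i < ((0 : Nat) : Int)) := by omega
    rw [pvIter_zero, if_neg h]
    simp only [Prod.mk.injEq, and_true]
    omega
  | succ n ih =>
    intro i xs
    have hstep : pvIter pvStepPos (n + 1) (i, xs) = pvIter pvStepPos n (pvStepPos (i, xs) 0) := by
      rw [pvIter_succ]
      exact (pvIter_shift pvStepPos n (i, xs)).symm
    rw [hstep]
    by_cases hi : i = 0
    · subst hi
      have hs : pvStepPos ((0 : Int), xs) 0 = (0, [(0:Int)] ++ xs) := by simp [pvStepPos]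
      rw [hs, ih]
      have h2 : (0 ≤ (0:Int) ∧ (0:Int) < ((n+1 : Nat) : Int)) := by
        constructor
        · omega
        · push_cast; omega
      rw [if_pos h2]
      by_cases hn : (0:Int) < (n : Int)
      · have h1 : (0 ≤ (0:Int) ∧ (0:Int) < (n : Int)) := ⟨le_refl 0, hn⟩
        rw [if_pos h1]
        simp only [Prod.mk.injEq, true_and]
        have e1 : (((n:Int)) - 0).toNat = n := by omega
        have e2 : ((((n+1 : Nat) : Int)) - 0).toNat = n + 1 := by push_cast; omega
        rw [e1, e2]
        exact pv_repl_left n xs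
      · have hn0 : n = 0 := by omega
        subst hn0
        have h1 : ¬ (0 ≤ (0:Int) ∧ (0:Int) < ((0:Nat) : Int)) := by omega
        rw [if_neg h1]
        simp only [Prod.mk.injEq]
        constructor
        · omega
        · have e2 : ((((0+1 : Nat) : Int)) - 0).toNat = 1 := by omega
          rw [e2]
          rfl
    · have hs : pvStepPos (i, xs) 0 = (i - 1, xs) := by simp [pvStepPos, hi]
      rw [hs, ih]
      by_cases h1 : 0 ≤ i - 1 ∧ i - 1 < (n : Int)
      · have h2 : 0 ≤ i ∧ i < ((n+1 : Nat) : Int) := by push_cast; push_cast at h1; omega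
        rw [if_pos h1, if_pos h2]
        simp only [Prod.mk.injEq, true_and]
        have e : ((n : Int) - (i - 1)).toNat = (((n+1 : Nat) : Int) - i).toNat := by
          push_cast; omega
        rw [e]
      · have h2 : ¬ (0 ≤ i ∧ i < ((n+1 : Nat) : Int)) := by push_cast; push_cast at h1; omega
        rw [if_neg h1, if_neg h2]
        simp only [Prod.mk.injEq, and_true]
        push_cast
        omega

theorem iterNeg_closed (n : Nat) : ∀ (i : Int) (xs : List Int),
    pvIter pvStepNeg n (i, xs) =
      if i < (xs.length : Int) then
        (i + n, xs ++ List.replicate (i + (n : Int) - xs.length + 1).toNat 0)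
      else (i + max 0 ((n : Int) - (i - xs.length + 1)), xs ++ List.replicate n 0) := by
  induction n with
  | zero =>
    intro i xs
    by_cases h : i < (xs.length : Int)
    · rw [pvIter_zero, if_pos h]
      simp only [Prod.mk.injEq]
      constructor
      · omega
      · have e : (i + ((0:Nat) : Int) - xs.length + 1).toNat = 0 := by omega
        rw [e]
        simp
    · rw [pvIter_zero, if_neg h]
      simp only [Prod.mk.injEq]
      constructor
      · have e : max 0 (((0:Nat) : Int) - (i - xs.length + 1)) = 0 := by omega
        rw [e]
        omega
      · simp
  | succ n ih =>
    intro i xs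
    have hstep : pvIter pvStepNeg (n + 1) (i, xs) = pvIter pvStepNeg n (pvStepNeg (i, xs) 0) := by
      rw [pvIter_succ]
      exact (pvIter_shift pvStepNeg n (i, xs)).symm
    rw [hstep]
    have hlen : (((xs ++ [(0:Int)]).length : Nat) : Int) = (xs.length : Int) + 1 := by
      simp
    by_cases h : i < (xs.length : Int)
    · have hs : pvStepNeg (i, xs) 0 =
          (i + 1, if i + 1 ≥ (xs.length : Int) then xs ++ [(0:Int)] else xs) := by
        simp [pvStepNeg, h]
      rw [hs]
      by_cases h2 : i + 1 ≥ (xs.length : Int)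
      · rw [if_pos h2, ih]
        have hlt : i + 1 < ((xs ++ [(0:Int)]).length : Int) := by rw [hlen]; omega
        rw [if_pos hlt, if_pos h]
        simp only [Prod.mk.injEq]
        constructor
        · push_cast; omega
        · have e1 : (i + 1 + (n : Int) - ((xs ++ [(0:Int)]).length : Int) + 1).toNat = n := by
            rw [hlen]; omega
          have e2 : (i + ((n+1 : Nat) : Int) - (xs.length : Int) + 1).toNat = n + 1 := by
            push_cast; omega
          rw [e1, e2]
          exact pv_repl_right n xs
      · rw [if_neg h2, ih]
        have h3 : i + 1 < (xs.length : Int) := by omega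
        rw [if_pos h3, if_pos h]
        simp only [Prod.mk.injEq]
        constructor
        · push_cast; omega
        · have e : (i + 1 + (n : Int) - (xs.length : Int) + 1).toNat
              = (i + ((n+1 : Nat) : Int) - (xs.length : Int) + 1).toNat := by
            push_cast; omega
          rw [e]
    · have hs : pvStepNeg (i, xs) 0 = (i, xs ++ [(0:Int)]) := by
        have hge : i ≥ (xs.length : Int) := by omega
        simp [pvStepNeg, h, hge]
      rw [hs, ih, if_neg h]
      by_cases h2 : i < ((xs ++ [(0:Int)]).length : Int)
      · rw [if_pos h2]
        have hi : i = (xs.length : Int) := by rw [hlen] at h2; omega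
        simp only [Prod.mk.injEq]
        constructor
        · push_cast; omega
        · have e1 : (i + (n : Int) - ((xs ++ [(0:Int)]).length : Int) + 1).toNat = n := by
            rw [hlen]; omega
          rw [e1]
          exact pv_repl_right n xs
      · rw [if_neg h2]
        simp only [Prod.mk.injEq]
        constructor
        · rw [hlen] at h2 ⊢
          push_cast
          omega
        · exact pv_repl_right n xs

theorem foldl_pos (v : Int) (s : Int × List Int) :
    (PySem.List.pyRange 0 v 1).foldl pvStepPos s = pvIter pvStepPos v.toNat s := by
  rw [foldl_const_step pvStepPos (by intro s a b; rfl)]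
  have e : (PySem.List.pyRange 0 v 1).length = v.toNat := by
    rw [PySem.List.length_pyRange_one]; omega
  rw [e]

theorem foldl_neg (v : Int) (s : Int × List Int) :
    (PySem.List.pyRange 0 v 1).foldl pvStepNeg s = pvIter pvStepNeg v.toNat s := by
  rw [foldl_const_step pvStepNeg (by intro s a b; rfl)]
  have e : (PySem.List.pyRange 0 v 1).length = v.toNat := by
    rw [PySem.List.length_pyRange_one]; omega
  rw [e]

-- ===== VERDICT (by name: the statement is the Claim_ definition above) =====
theorem move_vector_spec : Claim_equal_move_vector := by
  intro x ind value _
  unfold Spec_move_vector move_vector move_vector_alt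
  by_cases h0 : value = 0
  · simp [h0]
  · simp only [h0, if_false]
    by_cases hp : value > 0
    · have hnn : ¬ value < 0 := by omega
      simp only [hp, if_true, hnn, if_false]
      rw [foldl_pos, iterPos_closed]
      have hv : ((value.toNat : Nat) : Int) = value := by omega
      rw [hv]
    · have hn : value < 0 := by omega
      simp only [hp, if_false, hn, if_true]
      rw [foldl_neg, iterNeg_closed]
      have hv : (((-value).toNat : Nat) : Int) = -value := by omega
      rw [hv]
      by_cases hge : ind ≥ (x.length : Int)
      · have hlt : ¬ ind < (x.length : Int) := by omega
        simp only [hlt, if_false, hge, if_true]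
        have hL : (((x ++ List.replicate (-value).toNat (0:Int)).length : Nat) : Int)
            = (x.length : Int) + -value := by
          simp
          omega
        simp only [hL, Prod.mk.injEq, and_true]
        split_ifs <;> omega
      · have hlt : ind < (x.length : Int) := by omega
        simp only [hlt, if_true, hge, if_false]
        by_cases hpp : ind + -value - (x.length : Int) + 1 > 0
        · simp only [hpp, if_true]
        · have e : (ind + -value - (x.length : Int) + 1).toNat = 0 := by omega
          simp [hpp, e]
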